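-- pv_equiv track=rewrite | github.com/stepsame/grokking-code | pramp/index_element_equlity.py | solution
-- ===== SOURCE A (Python) =====
-- def solution(arr):
--     left, right = 0, len(arr) - 1
--     while left <= right:
--         mid = (left + right) // 2
--         if mid == arr[mid]:
--             # find the first one
--             while mid > 0 and mid - 1 == arr[mid - 1]:
--                 mid -= 1
--             return mid
--         if mid > arr[mid]:
--             left = mid + 1
--         else:
--             right = mid - 1
--     return -1
-- ===== SOURCE B (Python) =====
-- def solution(arr):
--     n = len(arr)
--     # one forward pass: start[i] = first index of the contiguous run of fixed
--     # points ending at i (i itself if arr[i] != i)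
--     start = []
--     cur = 0
--     for i, v in enumerate(arr):
--         if v == i:
--             start.append(cur)
--         else:
--             cur = i + 1
--             start.append(i)
--
--     # recursive binary search over the half-open interval [lo, hi);
--     # on a match the run start is a single table lookup, no back-scan
--     def go(lo, hi):
--         if lo >= hi:
--             return -1
--         mid = (lo + hi - 1) // 2
--         v = arr[mid]
--         if v == mid:
--             return start[mid]
--         if v < mid:
--             return go(mid + 1, hi)
--         return go(lo, mid)
--
--     return go(0, n)
-- ===== Notes on version B (the rewrite author's own statement) =====
-- stated objective: alternative
-- what changed: A's on-match inner backward while-scan is eliminated by a one-pass precomputed run-start table looked up in O(1), and the iterative closed-interval Int loop is replaced by a recursive binary search over a half-open Nat interval.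
import Mathlib
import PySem

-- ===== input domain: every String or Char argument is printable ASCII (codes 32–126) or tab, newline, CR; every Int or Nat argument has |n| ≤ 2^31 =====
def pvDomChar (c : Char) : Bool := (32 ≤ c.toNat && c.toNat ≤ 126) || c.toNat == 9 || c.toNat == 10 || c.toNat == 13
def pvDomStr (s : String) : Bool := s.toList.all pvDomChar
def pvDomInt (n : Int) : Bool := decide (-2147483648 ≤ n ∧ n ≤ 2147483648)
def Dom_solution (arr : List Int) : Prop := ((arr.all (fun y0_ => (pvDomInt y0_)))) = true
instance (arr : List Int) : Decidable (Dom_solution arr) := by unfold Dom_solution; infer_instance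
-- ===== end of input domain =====

-- B replaces A's on-match backward while-scan by a one-pass precomputed run-start table,
-- and A's iterative closed-interval Int loop by a recursive half-open Nat binary search;
-- proved equal on all inputs.

-- ===== PORT A =====
-- inner `while mid > 0 and mid - 1 == arr[mid - 1]: mid -= 1` (fuel ≥ mid suffices, proved below)
def backA (arr : List Int) : Nat → Int → Int
  | 0, mid => mid
  | fuel + 1, mid =>
    if 0 < mid ∧ PySem.List.pyGet? arr (mid - 1) = some (mid - 1) then backA arr fuel (mid - 1)
    else mid

-- outer `while left <= right` loop of A (the `none` branch is Python's IndexError, unreachable from `solution`)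
def loopA (arr : List Int) : Nat → Int → Int → Int
  | 0, _, _ => -1
  | fuel + 1, left, right =>
    if left ≤ right then
      match PySem.List.pyGet? arr (PySem.Int.floordiv (left + right) 2) with
      | none => -1
      | some v =>
        if PySem.Int.floordiv (left + right) 2 = v then
          backA arr arr.length (PySem.Int.floordiv (left + right) 2)
        else if PySem.Int.floordiv (left + right) 2 > v then
          loopA arr fuel (PySem.Int.floordiv (left + right) 2 + 1) right
        else loopA arr fuel left (PySem.Int.floordiv (left + right) 2 - 1)
    else -1

def solution (arr : List Int) : Int := loopA arr (arr.length + 1) 0 ((arr.length : Int) - 1)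

-- ===== PORT B =====
-- the `for i, v in enumerate(arr)` pass building `start` (i = index, cur = start of the current run)
def mkStart : List Int → Int → Int → List Int
  | [], _, _ => []
  | x :: xs, i, cur =>
    if x = i then cur :: mkStart xs (i + 1) cur else i :: mkStart xs (i + 1) (i + 1)

-- recursive `go(lo, hi)` on the half-open Nat interval [lo, hi); indices are always in range
-- when hi ≤ arr.length, so `getD _ 0` is exact for Python's arr[mid] / start[mid] there
def goB (arr st : List Int) (lo hi : Nat) : Int :=
  if lo < hi then
    if arr.getD ((lo + hi - 1) / 2) 0 = (((lo + hi - 1) / 2 : Nat) : Int) then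
      st.getD ((lo + hi - 1) / 2) 0
    else if arr.getD ((lo + hi - 1) / 2) 0 < (((lo + hi - 1) / 2 : Nat) : Int) then
      goB arr st ((lo + hi - 1) / 2 + 1) hi
    else goB arr st lo ((lo + hi - 1) / 2)
  else -1
termination_by hi - lo
decreasing_by all_goals omega

def solution_alt (arr : List Int) : Int := goB arr (mkStart arr 0 0) 0 arr.length

-- ===== PRECONDITION & SPEC =====
def Spec_solution (arr : List Int) (out : Int) : Prop := out = solution_alt arr
instance (arr : List Int) (out : Int) : Decidable (Spec_solution arr out) := by unfold Spec_solution; infer_instance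

-- ===== CLAIM =====
def Claim_equal_solution : Prop := ∀ (arr : List Int), Dom_solution arr → Spec_solution arr (solution arr)

-- ===== LEMMAS AND PROOFS =====

-- the table's recurrence: at a fixed point k+1 the run of k is extended, otherwise a new run starts
theorem mk_rec (arr : List Int) :
    ∀ (i cur : Int) (k : Nat),
      arr[k + 1]? = some (i + (k + 1)) →
      (mkStart arr i cur)[k + 1]? =
        if arr[k]? = some (i + k) then (mkStart arr i cur)[k]? else some (i + (k + 1)) := by
  induction arr with
  | nil => intro i cur k h; simp at h
  | cons x xs ih =>
    intro i cur k h
    cases k with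
    | zero =>
      simp only [List.getElem?_cons_succ, List.getElem?_cons_zero, Nat.cast_zero,
        add_zero, zero_add] at h ⊢
      cases xs with
      | nil => simp at h
      | cons y ys =>
        simp only [List.getElem?_cons_zero, Option.some.injEq] at h
        by_cases hx : x = i
        · rw [mkStart, if_pos hx]
          simp only [List.getElem?_cons_succ, List.getElem?_cons_zero]
          rw [mkStart, if_pos (by omega), if_pos (by rw [hx])]
          rfl
        · rw [mkStart, if_neg hx]
          simp only [List.getElem?_cons_succ, List.getElem?_cons_zero]
          rw [mkStart, if_pos (by omega),
            if_neg (by simp only [Option.some.injEq]; exact hx)]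
          simp
    | succ m =>
      simp only [List.getElem?_cons_succ] at h ⊢
      have h' : xs[m + 1]? = some ((i + 1) + (m + 1)) := by
        rw [h]
        congr 1
        push_cast
        ring
      have e1 : (i + 1) + (m : Int) = i + ((m + 1 : Nat) : Int) := by push_cast; ring
      have e2 : (i + 1) + ((m : Int) + 1) = i + (((m + 1 : Nat) : Int) + 1) := by push_cast; ring
      by_cases hx : x = i
      · rw [mkStart, if_pos hx]
        simp only [List.getElem?_cons_succ]
        rw [ih (i + 1) cur m h', e1, e2]
      · rw [mkStart, if_neg hx]
        simp only [List.getElem?_cons_succ]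
        rw [ih (i + 1) (i + 1) m h', e1, e2]

-- A's back-scan from a fixed point computes exactly the precomputed run start
theorem back_eq_start (arr : List Int) :
    ∀ (k : Nat), arr[k]? = some (k : Int) →
      ∀ fuel : Nat, k ≤ fuel →
        (mkStart arr 0 0)[k]? = some (backA arr fuel (k : Int)) := by
  intro k
  induction k with
  | zero =>
    intro hfix fuel _
    have hz : ∀ f : Nat, backA arr f (((0 : Nat)) : Int) = 0 := by
      intro f
      cases f with
      | zero => simp [backA]
      | succ m =>
        rw [backA, if_neg]
        · simp
        · intro hcon
          have := hcon.1
          omega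
    rw [hz]
    cases arr with
    | nil => simp at hfix
    | cons x xs =>
      simp only [List.getElem?_cons_zero, Option.some.injEq] at hfix
      rw [mkStart]
      split_ifs with hx
      · simp
      · simp only [Nat.cast_zero] at hfix
        exact absurd hfix hx
  | succ m ih =>
    intro hfix fuel hfuel
    cases fuel with
    | zero => omega
    | succ f =>
      rw [backA]
      have hc : (((m + 1 : Nat)) : Int) - 1 = (m : Int) := by push_cast; ring
      rw [hc]
      have hrec := mk_rec arr 0 0 m (by rw [hfix]; congr 1; push_cast; ring)
      by_cases hprev : arr[m]? = some ((m : Int))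
      · rw [if_pos ⟨by positivity, by rw [PySem.List.pyGet?_natCast, hprev]⟩]
        rw [hrec, if_pos (by rw [hprev]; congr 1; ring)]
        exact ih hprev f (by omega)
      · rw [if_neg (by
          intro hcon
          have h2 := hcon.2
          rw [PySem.List.pyGet?_natCast] at h2
          exact hprev h2)]
        rw [hrec, if_neg (by
          intro hcon
          apply hprev
          rw [hcon]
          congr 1
          ring)]
        congr 1
        push_cast
        ring

-- A's closed-interval Int loop equals B's half-open Nat recursion (left = lo, right = hi - 1)
theorem loop_eq (arr : List Int) :
    ∀ (fuel lo hi : Nat), hi ≤ arr.length → hi - lo ≤ fuel →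
      loopA arr fuel (lo : Int) ((hi : Int) - 1) = goB arr (mkStart arr 0 0) lo hi := by
  intro fuel
  induction fuel with
  | zero =>
    intro lo hi _ hf
    rw [loopA, goB, if_neg (by omega)]
  | succ n ih =>
    intro lo hi hlen hf
    rw [loopA, goB]
    by_cases hlh : lo < hi
    · rw [if_pos (by omega), if_pos hlh]
      set m : Nat := (lo + hi - 1) / 2 with hm
      have hmlo : lo ≤ m := by omega
      have hmhi : m < hi := by omega
      have hmid : PySem.Int.floordiv ((lo : Int) + ((hi : Int) - 1)) 2 = (m : Int) := by
        have : (lo : Int) + ((hi : Int) - 1) = ((lo + hi - 1 : Nat) : Int) := by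
          push_cast [Nat.cast_sub (by omega : 1 ≤ lo + hi)]; ring
        rw [this]
        exact_mod_cast PySem.Int.floordiv_natCast (lo + hi - 1) 2
      rw [hmid]
      have hin : m < arr.length := by omega
      have hg : PySem.List.pyGet? arr (m : Int) = some (arr.getD m 0) := by
        rw [PySem.List.pyGet?_natCast, List.getElem?_eq_getElem hin, List.getD_eq_getElem?_getD,
          List.getElem?_eq_getElem hin]
        rfl
      rw [hg]
      dsimp only
      by_cases heq : arr.getD m 0 = (m : Int)
      · rw [if_pos heq.symm, if_pos heq]
        have hfix : arr[m]? = some ((m : Nat) : Int) := by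
          rw [List.getElem?_eq_getElem hin]
          rw [List.getD_eq_getElem?_getD, List.getElem?_eq_getElem hin] at heq
          simpa using heq
        have hst := back_eq_start arr m hfix arr.length (by omega)
        rw [List.getD_eq_getElem?_getD, hst]
        rfl
      · rw [if_neg (fun h => heq h.symm), if_neg heq]
        by_cases hlt : arr.getD m 0 < (m : Int)
        · rw [if_pos hlt, if_pos hlt]
          have : (m : Int) + 1 = ((m + 1 : Nat) : Int) := by push_cast; ring
          rw [this]
          exact ih (m + 1) hi hlen (by omega)
        · rw [if_neg hlt, if_neg hlt]
          exact ih lo m (by omega) (by omega)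
    · rw [if_neg (by omega), if_neg hlh]

-- ===== VERDICT =====
theorem solution_spec : Claim_equal_solution := by
  intro arr _
  unfold Spec_solution solution solution_alt
  have := loop_eq arr (arr.length + 1) 0 arr.length (le_refl _) (by omega)
  simpa using this
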